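-- pv_equiv track=rewrite | github.com/stnbu/rpi | dsm/main.py | get_channel_data
-- ===== SOURCE A (Python) =====
-- def get_channel_data(bytes):
--     for index, byte in enumerate(bytes):
--         if index % 2:  # if an odd member
--             channel_id = last & 0b11111100
--             channel_id = channel_id >> 2  # first two bits are for something else
--             last = last & 0b00000011  # mask the first 6 bits
--             last = last << 8
--             position = byte | last  # "append" byte to the last byte
--             yield channel_id, position
--         last = byte
-- ===== SOURCE B (Python) =====
-- def get_channel_data(bytes):
--     it = iter(bytes)
--     for high, low in zip(it, it):
--         channel_id = (high & 0b11111100) >> 2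
--         position = ((high & 0b00000011) << 8) | low
--         yield channel_id, position
-- ===== Notes on version B (the rewrite author's own statement) =====
-- stated objective: simpler
-- what changed: Replaces the index-parity test and carried 'last' state with direct pairwise consumption of the iterator via zip(it, it), decoding each (high, low) pair in one step.
import Mathlib
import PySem

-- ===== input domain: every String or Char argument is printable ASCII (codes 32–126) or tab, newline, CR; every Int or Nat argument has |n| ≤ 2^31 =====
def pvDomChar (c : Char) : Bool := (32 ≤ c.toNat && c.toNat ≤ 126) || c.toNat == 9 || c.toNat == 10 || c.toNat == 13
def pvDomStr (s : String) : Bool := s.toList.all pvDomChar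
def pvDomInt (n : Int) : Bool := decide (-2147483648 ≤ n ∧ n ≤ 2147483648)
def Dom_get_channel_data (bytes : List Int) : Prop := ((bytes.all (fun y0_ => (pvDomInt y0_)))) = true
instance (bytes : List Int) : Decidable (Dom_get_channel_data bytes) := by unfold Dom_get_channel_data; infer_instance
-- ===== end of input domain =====

-- B decodes the stream by consuming two bytes at a time instead of A's enumerate loop with a
-- parity test and a carried `last` byte; same single O(n) pass, simpler decomposition.

-- ===== PORT A =====
-- loop body of A's `for index, byte in enumerate(bytes)`: state = (last, emitted pairs)
def pvStepA (st : Int × List (Int × Int)) (ib : Int × Int) : Int × List (Int × Int) :=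
  let index := ib.1
  let byte := ib.2
  let st' :=
    if PySem.Int.mod index 2 ≠ 0 then
      let channel_id := PySem.Int.band st.1 0b11111100
      let channel_id := channel_id >>> 2
      let last := PySem.Int.band st.1 0b00000011
      let last := last <<< 8
      let position := PySem.Int.bor byte last
      (st.1, st.2 ++ [(channel_id, position)])
    else st
  (byte, st'.2)

-- Python's `last` is unassigned before index 0, but the odd branch never fires at index 0,
-- so the initial value 0 is never read.
def get_channel_data (bytes : List Int) : List (Int × Int) :=
  ((PySem.List.enumerate bytes 0).foldl pvStepA (0, [])).2

-- ===== PORT B =====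
def get_channel_data_alt : List Int → List (Int × Int)
  | high :: low :: rest =>
      ((PySem.Int.band high 0b11111100) >>> 2,
       PySem.Int.bor ((PySem.Int.band high 0b00000011) <<< 8) low) :: get_channel_data_alt rest
  | _ => []

-- ===== PRECONDITION & SPEC =====
def Spec_get_channel_data (bytes : List Int) (out : List (Int × Int)) : Prop := out = get_channel_data_alt bytes
instance (bytes : List Int) (out : List (Int × Int)) : Decidable (Spec_get_channel_data bytes out) := by unfold Spec_get_channel_data; infer_instance

-- ===== CLAIM (what is proved, stated in full; the proofs are below) =====
def Claim_equal_get_channel_data : Prop := ∀ (bytes : List Int), Dom_get_channel_data bytes → Spec_get_channel_data bytes (get_channel_data bytes)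

-- ===== LEMMAS AND PROOFS =====

-- loop invariant: folding A's step over an even-started enumeration of the remaining bytes
-- appends exactly B's decoding of those bytes, for any carried `last` and accumulator.
theorem pv_gen (bytes : List Int) : ∀ (s last : Int) (out : List (Int × Int)),
    s % 2 = 0 →
    ((PySem.List.enumerate bytes s).foldl pvStepA (last, out)).2 =
      out ++ get_channel_data_alt bytes := by
  fun_induction get_channel_data_alt bytes with
  | case1 high low rest ih =>
      intro s last out hs
      simp only [PySem.List.enumerate_cons, List.foldl_cons]
      have e1 : pvStepA (last, out) (s, high) = (high, out) := by
        simp only [pvStepA, PySem.Int.mod_eq_emod_of_pos (b := 2) (by omega)]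
        rw [if_neg (by omega)]
      have e2 : pvStepA (high, out) (s + 1, low) =
          (low, out ++ [((PySem.Int.band high 0b11111100) >>> 2,
                         PySem.Int.bor ((PySem.Int.band high 0b00000011) <<< 8) low)]) := by
        simp only [pvStepA, PySem.Int.mod_eq_emod_of_pos (b := 2) (by omega)]
        rw [if_pos (by omega)]
        simp [PySem.Int.bor_comm]
      rw [e1, e2, ih (s + 1 + 1) low _ (by omega)]
      simp
  | case2 xs hne =>
      intro s last out hs
      match xs, hne with
      | a :: b :: r, hne => exact (hne a b r rfl).elim
      | [], _ => simp [PySem.List.enumerate_nil]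
      | [a], _ =>
          have e1 : pvStepA (last, out) (s, a) = (a, out) := by
            simp only [pvStepA, PySem.Int.mod_eq_emod_of_pos (b := 2) (by omega)]
            rw [if_neg (by omega)]
          simp [PySem.List.enumerate_cons, PySem.List.enumerate_nil, e1]

-- ===== VERDICT (by name: the statement is the Claim_ definition above) =====
theorem get_channel_data_spec : Claim_equal_get_channel_data := by
  intro bytes _
  unfold Spec_get_channel_data get_channel_data
  exact pv_gen bytes 0 0 [] rfl
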